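-- pv_equiv track=rewrite | github.com/beenycool/ytbot | utils/helpers.py | sanitize_text_for_tts
-- ===== SOURCE A (Python) =====
-- def sanitize_text_for_tts(text: str) -> str:
--     """Sanitize text for TTS processing"""
--     # Remove special characters that might cause TTS issues
--     replacements = {
--         '&': 'and',
--         '@': 'at',
--         '#': 'hashtag',
--         '$': 'dollars',
--         '%': 'percent',
--         '+': 'plus',
--         '=': 'equals',
--         '<': 'less than',
--         '>': 'greater than',
--         '|': 'pipe',
--         '\\': 'backslash',
--         '/': 'slash',
--         '*': 'star',
--         '~': 'tilde',
--         '`': 'backtick'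
--     }
--
--     for char, replacement in replacements.items():
--         text = text.replace(char, f' {replacement} ')
--
--     # Clean up extra spaces
--     text = ' '.join(text.split())
--
--     return text
-- ===== SOURCE B (Python) =====
-- def sanitize_text_for_tts(text: str) -> str:
--     """Sanitize text for TTS: one streaming tokenizer pass that emits words directly."""
--     special = dict(zip('&@#$%+=<>|\\/*~`',
--                        ['and', 'at', 'hashtag', 'dollars', 'percent', 'plus', 'equals',
--                         'less than', 'greater than', 'pipe', 'backslash', 'slash',
--                         'star', 'tilde', 'backtick']))
--
--     words = []
--     buf = []
--     for ch in text:
--         if ch in special: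
--             if buf:
--                 words.append(''.join(buf))
--                 buf = []
--             words.extend(special[ch].split())
--         elif ch.isspace():
--             if buf:
--                 words.append(''.join(buf))
--                 buf = []
--         else:
--             buf.append(ch)
--     if buf:
--         words.append(''.join(buf))
--     return ' '.join(words)
-- ===== Notes on version B (the rewrite author's own statement) =====
-- stated objective: alternative
-- what changed: B is a single streaming tokenizer pass that emits the output words directly (current-word buffer + word list, one dict lookup per character) instead of A's 15 sequential full-string .replace scans followed by a join-then-resplit normalization; it trades A's C-level replace loops for one explicit pass.
import Mathlib
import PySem

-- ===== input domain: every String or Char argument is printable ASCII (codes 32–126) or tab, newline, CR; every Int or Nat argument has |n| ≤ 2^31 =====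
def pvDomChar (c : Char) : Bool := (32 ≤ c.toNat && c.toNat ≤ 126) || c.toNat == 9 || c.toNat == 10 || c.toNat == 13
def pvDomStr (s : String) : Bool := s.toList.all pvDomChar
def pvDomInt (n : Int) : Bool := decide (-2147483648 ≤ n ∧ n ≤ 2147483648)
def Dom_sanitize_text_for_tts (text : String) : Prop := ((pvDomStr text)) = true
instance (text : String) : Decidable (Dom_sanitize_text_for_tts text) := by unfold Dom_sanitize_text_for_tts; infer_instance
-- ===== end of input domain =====

-- B is a streaming tokenizer: one pass over the characters that emits the output WORDS
-- directly (buffer + word list), instead of A's 15 full-string .replace scans followed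
-- by a join-then-resplit normalization.

-- ===== PORT A =====
def pvDictA : PySem.Dict String String := PySem.Dict.mk
  [("&", "and"), ("@", "at"), ("#", "hashtag"), ("$", "dollars"), ("%", "percent"),
   ("+", "plus"), ("=", "equals"), ("<", "less than"), (">", "greater than"),
   ("|", "pipe"), ("\\", "backslash"), ("/", "slash"), ("*", "star"),
   ("~", "tilde"), ("`", "backtick")]

-- for char, replacement in replacements.items(): text = text.replace(char, f' {replacement} ')
-- then ' '.join(text.split())
def sanitize_text_for_tts (text : String) : String :=
  PySem.Str.join " " (PySem.Str.split₀
    (pvDictA.items.foldl (fun t p => PySem.Str.replace t p.1 (" " ++ p.2 ++ " ")) text))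

-- ===== PORT B =====
-- special = dict(zip('&@#$%+=<>|\\/*~`', [...words...]))
def pvDictB : PySem.Dict Char String := PySem.Dict.mk
  (List.zip "&@#$%+=<>|\\/*~`".toList
    ["and", "at", "hashtag", "dollars", "percent", "plus", "equals",
     "less than", "greater than", "pipe", "backslash", "slash",
     "star", "tilde", "backtick"])

-- state = (words, buf); specials flush buf and extend words with the replacement's words,
-- whitespace flushes buf, any other char grows buf; at the end flush and ' '.join(words)
def sanitize_text_for_tts_alt (text : String) : String :=
  let st := text.toList.foldl (fun (st : List String × List Char) ch =>
    match pvDictB.get? ch with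
    | some v =>
        ((if st.2.isEmpty then st.1 else st.1 ++ [String.ofList st.2])
           ++ PySem.Str.split₀ v, [])
    | none =>
        if PySem.Chars.isspace ch then
          ((if st.2.isEmpty then st.1 else st.1 ++ [String.ofList st.2]), [])
        else (st.1, st.2 ++ [ch])) ([], [])
  PySem.Str.join " "
    (if st.2.isEmpty then st.1 else st.1 ++ [String.ofList st.2])

-- ===== PRECONDITION & SPEC =====
def Spec_sanitize_text_for_tts (text : String) (out : String) : Prop := out = sanitize_text_for_tts_alt text
instance (text : String) (out : String) : Decidable (Spec_sanitize_text_for_tts text out) := by unfold Spec_sanitize_text_for_tts; infer_instance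

-- ===== CLAIM (what is proved, stated in full; the proofs are below) =====
def Claim_equal_sanitize_text_for_tts : Prop := ∀ (text : String), Dom_sanitize_text_for_tts text → Spec_sanitize_text_for_tts text (sanitize_text_for_tts text)

-- ===== LEMMAS AND PROOFS =====

-- single-character substitution map: replace k by r, leave every other char alone
def pvSub (k : Char) (r : List Char) (c : Char) : List Char := if k = c then r else [c]

-- first-match lookup through a list of (key, padded replacement) pairs
def pvLook : List (Char × List Char) → Char → List Char
  | [], c => [c]
  | (k, r) :: rest, c => if k = c then r else pvLook rest c

-- the table both ports use, keys as chars, replacements already space-padded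
def pvSteps : List (Char × List Char) :=
  [('&', " and ".toList), ('@', " at ".toList), ('#', " hashtag ".toList),
   ('$', " dollars ".toList), ('%', " percent ".toList), ('+', " plus ".toList),
   ('=', " equals ".toList), ('<', " less than ".toList), ('>', " greater than ".toList),
   ('|', " pipe ".toList), ('\\', " backslash ".toList), ('/', " slash ".toList),
   ('*', " star ".toList), ('~', " tilde ".toList), ('`', " backtick ".toList)]

theorem pv_go_single (k : Char) (r : List Char) :
    ∀ (fuel : Nat) (l acc : List Char), l.length ≤ fuel →
      PySem.Chars.replace.go [k] r fuel l acc = acc.reverse ++ l.flatMap (pvSub k r) := by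
  intro fuel
  induction fuel with
  | zero =>
    intro l acc h
    cases l with
    | nil => simp [PySem.Chars.replace.go]
    | cons c t => simp at h
  | succ n ih =>
    intro l acc h
    cases l with
    | nil => simp [PySem.Chars.replace.go]
    | cons c t =>
      by_cases hk : k = c
      · subst hk
        have hp : List.isPrefixOf [k] (k :: t) = true := by simp [List.isPrefixOf]
        rw [show PySem.Chars.replace.go [k] r (n+1) (k :: t) acc
              = PySem.Chars.replace.go [k] r n ((k :: t).drop [k].length) (r.reverse ++ acc) by
            simp [PySem.Chars.replace.go, hp]]
        rw [show ((k :: t).drop [k].length) = t by simp]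
        rw [ih t (r.reverse ++ acc) (by simpa using Nat.le_of_succ_le_succ h)]
        simp [pvSub]
      · have hp : List.isPrefixOf [k] (c :: t) = false := by
          simp [List.isPrefixOf]; exact hk
        rw [show PySem.Chars.replace.go [k] r (n+1) (c :: t) acc
              = PySem.Chars.replace.go [k] r n t (c :: acc) by
            simp [PySem.Chars.replace.go, hp]]
        rw [ih t (c :: acc) (by simpa using Nat.le_of_succ_le_succ h)]
        simp [pvSub, hk]

theorem pv_replace_single (s : List Char) (k : Char) (r : List Char) :
    PySem.Chars.replace s [k] r = s.flatMap (pvSub k r) := by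
  simp only [PySem.Chars.replace, List.isEmpty_cons, Bool.false_eq_true, if_false]
  simpa using pv_go_single k r s.length s [] (Nat.le_refl _)

-- A's replace loop, generically: a fold of single-char replaces is a fold of flatMaps
theorem pv_foldA (items : List (String × String)) (steps : List (Char × List Char))
    (h : items.map (fun p => (p.1.toList, (" " ++ p.2 ++ " ").toList))
       = steps.map (fun q => ([q.1], q.2))) :
    ∀ (t : String),
      (items.foldl (fun t p => PySem.Str.replace t p.1 (" " ++ p.2 ++ " ")) t).toList
      = steps.foldl (fun l q => l.flatMap (pvSub q.1 q.2)) t.toList := by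
  induction items generalizing steps with
  | nil =>
    cases steps with
    | nil => intro t; simp
    | cons q qs => simp at h
  | cons p ps ih =>
    cases steps with
    | nil => simp at h
    | cons q qs =>
      intro t
      simp only [List.map_cons, List.cons.injEq, Prod.mk.injEq] at h
      obtain ⟨⟨h1, h2⟩, hrest⟩ := h
      have hin : (PySem.Str.replace t p.1 (" " ++ p.2 ++ " ")).toList
          = t.toList.flatMap (pvSub q.1 q.2) := by
        rw [PySem.Str.toList_replace, h1, h2, pv_replace_single]
      rw [List.foldl_cons, List.foldl_cons, ih qs hrest, hin]

theorem pv_look_id (steps : List (Char × List Char)) (c : Char)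
    (h : c ∉ steps.map Prod.fst) : pvLook steps c = [c] := by
  induction steps with
  | nil => rfl
  | cons q qs ih =>
    obtain ⟨k, r⟩ := q
    simp only [List.map_cons, List.mem_cons, not_or] at h
    simp only [pvLook]
    rw [if_neg (fun hkc => h.1 hkc.symm)]
    exact ih h.2

theorem pv_flatMap_look_id (steps : List (Char × List Char)) (r : List Char)
    (h : ∀ c ∈ r, c ∉ steps.map Prod.fst) : r.flatMap (pvLook steps) = r := by
  induction r with
  | nil => rfl
  | cons c cs ih =>
    simp only [List.flatMap_cons]
    rw [pv_look_id steps c (h c (by simp)), ih (fun x hx => h x (by simp [hx]))]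
    rfl

theorem pv_flatMap_assoc {α β γ : Type} (l : List α) (f : α → List β) (g : β → List γ) :
    (l.flatMap f).flatMap g = l.flatMap (fun x => (f x).flatMap g) := by
  induction l with
  | nil => rfl
  | cons x xs ih => simp [List.flatMap_cons, ih]

-- composing the whole replace fold into ONE first-match lookup pass
theorem pv_fold_look (steps : List (Char × List Char))
    (hk : ∀ p ∈ steps, ∀ c ∈ p.2, c ∉ steps.map Prod.fst) :
    ∀ (l : List Char),
      steps.foldl (fun t q => t.flatMap (pvSub q.1 q.2)) l = l.flatMap (pvLook steps) := by
  induction steps with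
  | nil => intro l; simp [pvLook, List.flatMap_singleton']
  | cons q qs ih =>
    intro l
    have hqs : ∀ p ∈ qs, ∀ c ∈ p.2, c ∉ qs.map Prod.fst := by
      intro p hp c hc hmem
      exact hk p (List.mem_cons_of_mem _ hp) c hc (by simp [hmem])
    have hfun : ∀ c, (pvSub q.1 q.2 c).flatMap (pvLook qs) = pvLook (q :: qs) c := by
      intro c
      obtain ⟨k, r⟩ := q
      by_cases hkc : k = c
      · simp only [pvSub, pvLook, if_pos hkc]
        exact pv_flatMap_look_id qs r
          (fun x hx hmem => hk (k, r) (by simp) x hx (by simp [hmem]))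
      · simp only [pvSub, pvLook, if_neg hkc]
        simp
    rw [List.foldl_cons, ih hqs, pv_flatMap_assoc]
    rw [show (fun c => (pvSub q.1 q.2 c).flatMap (pvLook qs)) = pvLook (q :: qs) from funext hfun]

set_option maxRecDepth 4096 in
theorem pv_hkeys_bool :
    (pvSteps.all (fun p => p.2.all (fun c => !((pvSteps.map Prod.fst).contains c)))) = true := by
  decide

theorem pv_hkeys : ∀ p ∈ pvSteps, ∀ c ∈ p.2, c ∉ pvSteps.map Prod.fst := by
  intro p hp c hc
  have h1 := List.all_eq_true.mp pv_hkeys_bool p hp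
  have h2 := List.all_eq_true.mp h1 c hc
  simpa using h2

-- the literal fact the A-side fold lemma needs about A's table
set_option maxRecDepth 4096 in
theorem pv_itemsA :
    pvDictA.items.map (fun p => (p.1.toList, (" " ++ p.2 ++ " ").toList))
      = pvSteps.map (fun q => ([q.1], q.2)) := by decide

-- B's per-character lookup agrees with first-match lookup in the padded table
theorem pv_get_look (L : List (Char × String)) (c : Char) :
    (match (PySem.Dict.mk L).get? c with
     | none => [c]
     | some w => (" " ++ w ++ " ").toList)
    = pvLook (L.map (fun p => (p.1, (" " ++ p.2 ++ " ").toList))) c := by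
  induction L with
  | nil => rfl
  | cons p ps ih =>
    obtain ⟨k, w⟩ := p
    rw [PySem.Dict.get?_mk_cons]
    simp only [List.map_cons, pvLook]
    by_cases hkc : k = c
    · subst hkc
      simp
    · simp only [beq_iff_eq, if_neg hkc]
      exact ih

set_option maxRecDepth 4096 in
theorem pv_steps_eq :
    pvDictB.items.map (fun p => (p.1, (" " ++ p.2 ++ " ").toList)) = pvSteps := by decide

-- ---- the whitespace tokenizer, written with an in-order current-word accumulator ----
def pvTok : List Char → List Char → List (List Char)
  | [], cur => if cur = [] then [] else [cur]
  | c :: rest, cur =>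
      if PySem.Chars.isspace c then
        (if cur = [] then pvTok rest [] else cur :: pvTok rest [])
      else pvTok rest (cur ++ [c])

-- split₀'s worker is pvTok with reversed accumulators
theorem pv_isspace_space : PySem.Chars.isspace ' ' = true := rfl

theorem pv_go_tok :
    ∀ (s cur : List Char) (acc : List (List Char)),
      PySem.Chars.split₀.go s cur acc = acc.reverse ++ pvTok s cur.reverse := by
  intro s
  induction s with
  | nil =>
    intro cur acc
    by_cases hc : cur = []
    · simp [PySem.Chars.split₀.go, pvTok, hc]
    · simp [PySem.Chars.split₀.go, pvTok, hc, List.isEmpty_iff]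
  | cons c rest ih =>
    intro cur acc
    by_cases hs : PySem.Chars.isspace c = true
    · by_cases hc : cur = []
      · simp [PySem.Chars.split₀.go, pvTok, hs, hc, ih]
      · simp only [PySem.Chars.split₀.go, hs, if_true, List.isEmpty_iff, hc, if_false, ih,
          List.reverse_cons]
        simp [pvTok, hs, hc]
    · simp only [PySem.Chars.split₀.go, hs, if_false, ih, List.reverse_cons, pvTok,
        Bool.false_eq_true]
      try simp [pvTok, hs]

theorem pv_split₀_tok (s : List Char) : PySem.Chars.split₀ s = pvTok s [] := by
  simpa using pv_go_tok s [] []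

-- a chunk ending in ' ' tokenizes independently of what follows
theorem pv_tok_append_space :
    ∀ (s t cur : List Char), pvTok (s ++ [' '] ++ t) cur = pvTok (s ++ [' ']) cur ++ pvTok t [] := by
  intro s
  induction s with
  | nil =>
    intro t cur
    by_cases hc : cur = [] <;>
      simp [pvTok, hc, pv_isspace_space]
  | cons c rest ih =>
    intro t cur
    have hl : (c :: rest) ++ [' '] ++ t = c :: (rest ++ [' '] ++ t) := by simp
    have hr : (c :: rest) ++ [' '] = c :: (rest ++ [' ']) := by simp
    rw [hl, hr]
    by_cases hs : PySem.Chars.isspace c = true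
    · by_cases hc : cur = [] <;> simp only [pvTok, hs, if_true, hc, if_false, ih] <;> simp
    · simp only [pvTok, hs, Bool.false_eq_true, if_false, ih]

-- a trailing ' ' is invisible to the tokenizer
theorem pv_tok_trailing_space :
    ∀ (s cur : List Char), pvTok (s ++ [' ']) cur = pvTok s cur := by
  intro s
  induction s with
  | nil =>
    intro cur
    by_cases hc : cur = [] <;> simp [pvTok, hc, pv_isspace_space]
  | cons c rest ih =>
    intro cur
    rw [show (c :: rest) ++ [' '] = c :: (rest ++ [' ']) from by simp]
    by_cases hs : PySem.Chars.isspace c = true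
    · by_cases hc : cur = [] <;> simp only [pvTok, hs, if_true, hc, if_false, ih]
    · simp only [pvTok, hs, Bool.false_eq_true, if_false, ih]

-- flushing the buffer, on the token side
def pvFlush (cur : List Char) : List (List Char) := if cur = [] then [] else [cur]

theorem pv_tok_space_cons (t cur : List Char) :
    pvTok (' ' :: t) cur = pvFlush cur ++ pvTok t [] := by
  by_cases hc : cur = [] <;> simp [pvTok, pvFlush, hc, pv_isspace_space]

-- B's fold computes exactly pvTok over the char stream A produces
theorem pv_B_tok :
    ∀ (l : List Char) (words : List String) (buf : List Char),
      (let st := l.foldl (fun (st : List String × List Char) ch =>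
          match pvDictB.get? ch with
          | some v =>
              ((if st.2.isEmpty then st.1 else st.1 ++ [String.ofList st.2])
                 ++ PySem.Str.split₀ v, [])
          | none =>
            if PySem.Chars.isspace ch then
              ((if st.2.isEmpty then st.1 else st.1 ++ [String.ofList st.2]), [])
            else (st.1, st.2 ++ [ch])) (words, buf);
        (if st.2.isEmpty then st.1 else st.1 ++ [String.ofList st.2]).map String.toList)
      = words.map String.toList ++ pvTok (l.flatMap (pvLook pvSteps)) buf := by
  intro l
  induction l with
  | nil =>
    intro words buf
    by_cases hb : buf = [] <;>
      simp [pvTok, hb, List.isEmpty_iff, String.toList_ofList]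
  | cons c rest ih =>
    intro words buf
    have hlook : (match pvDictB.get? c with
        | none => [c]
        | some w => (" " ++ w ++ " ").toList) = pvLook pvSteps c := by
      rw [← pv_steps_eq]
      exact pv_get_look pvDictB.items c
    simp only [List.foldl_cons, List.flatMap_cons]
    cases hg : pvDictB.get? c with
    | some v =>
      have hpad : pvLook pvSteps c = [' '] ++ v.toList ++ [' '] := by
        rw [← hlook, hg]; simp
      rw [ih, hpad]
      by_cases hb : buf = []
      · simp only [hb, List.isEmpty_nil, if_true]
        rw [show ([' '] ++ v.toList ++ [' ']) ++ rest.flatMap (pvLook pvSteps)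
              = ' ' :: (v.toList ++ [' '] ++ rest.flatMap (pvLook pvSteps)) by simp]
        rw [pv_tok_space_cons, pv_tok_append_space, pv_tok_trailing_space, ← pv_split₀_tok]
        simp [pvFlush, PySem.Str.split₀_map_toList, pv_split₀_tok]
      · simp only [List.isEmpty_iff, hb, if_false]
        rw [show ([' '] ++ v.toList ++ [' ']) ++ rest.flatMap (pvLook pvSteps)
              = ' ' :: (v.toList ++ [' '] ++ rest.flatMap (pvLook pvSteps)) by simp]
        rw [pv_tok_space_cons, pv_tok_append_space, pv_tok_trailing_space, ← pv_split₀_tok]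
        simp [pvFlush, hb, PySem.Str.split₀_map_toList, String.toList_ofList, pv_split₀_tok]
    | none =>
      have hone : pvLook pvSteps c = [c] := by rw [← hlook, hg]
      rw [hone]
      by_cases hs : PySem.Chars.isspace c = true
      · simp only [hs, if_true]
        by_cases hb : buf = []
        · rw [ih]
          simp [pvTok, hs, hb, List.isEmpty_iff]
        · rw [ih]
          simp [pvTok, hs, hb, List.isEmpty_iff, String.toList_ofList]
      · simp only [hs, if_false, Bool.false_eq_true]
        rw [ih]
        simp [pvTok, hs]

-- ===== VERDICT (by name: the statement is the Claim_ definition above) =====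
theorem sanitize_text_for_tts_spec : Claim_equal_sanitize_text_for_tts := by
  intro text _
  unfold Spec_sanitize_text_for_tts sanitize_text_for_tts sanitize_text_for_tts_alt
  have hA := pv_foldA pvDictA.items pvSteps pv_itemsA text
  rw [pv_fold_look pvSteps pv_hkeys] at hA
  apply String.toList_inj.mp
  rw [PySem.Str.toList_join, PySem.Str.toList_join,
      PySem.Str.split₀_map_toList, hA]
  have hB := pv_B_tok text.toList [] []
  simp only [List.map_nil, List.nil_append] at hB
  rw [hB, pv_split₀_tok]
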